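-- pv_equiv track=rewrite | github.com/l4m4re/growatt-rtu-broker | tools/parse_live_log.py | scan_combined
-- ===== SOURCE A (Python) =====
-- def modbus_crc(data: bytes) -> int:
--     crc = 0xFFFF
--     for b in data:
--         crc ^= b
--         for _ in range(8):
--             crc = (crc >> 1) ^ 0xA001 if (crc & 1) else (crc >> 1)
--     return crc & 0xFFFF
--
-- def crc_ok(frame: bytes) -> bool:
--     if len(frame) < 4:
--         return False
--     return modbus_crc(frame[:-2]) == int.from_bytes(frame[-2:], "little")
--
-- def scan_combined(hexs: str, max_frame: int = 512) -> int:
--     try: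
--         data = bytes.fromhex(hexs)
--     except Exception:
--         return 0
--     count = 0
--     i = 0
--     L = len(data)
--     while i + 4 <= L:
--         found = False
--         max_j = min(L, i + max_frame)
--         for j in range(i + 4, max_j + 1):
--             if crc_ok(data[i:j]):
--                 count += 1
--                 i = j
--                 found = True
--                 break
--         if not found:
--             i += 1
--     return count
-- ===== SOURCE B (Python) =====
-- _CRC_TABLE = None
--
-- def _crc_table():
--     # table-driven Modbus CRC: entry t = 8 bit rounds applied to t
--     global _CRC_TABLE
--     if _CRC_TABLE is None:
--         tab = []
--         for t in range(256):
--             c = t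
--             for _ in range(8):
--                 c = (c >> 1) ^ 0xA001 if (c & 1) else (c >> 1)
--             tab.append(c)
--         _CRC_TABLE = tab
--     return _CRC_TABLE
--
-- def scan_combined(hexs: str, max_frame: int = 512) -> int:
--     try:
--         data = bytes.fromhex(hexs)
--     except Exception:
--         return 0
--     L = len(data)
--     if L < 4:
--         return 0
--     tab = _crc_table()
--     count = 0
--     i = 0
--     while i + 4 <= L:
--         max_j = min(L, i + max_frame)
--         # running CRC of data[i:k]; candidate frame end j = k + 2
--         crc = 0xFFFF
--         crc = (crc >> 8) ^ tab[(crc ^ data[i]) & 0xFF]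
--         crc = (crc >> 8) ^ tab[(crc ^ data[i + 1]) & 0xFF]
--         found = 0
--         for k in range(i + 2, max_j - 1):
--             if crc == data[k] + 256 * data[k + 1]:
--                 found = k + 2
--                 break
--             crc = (crc >> 8) ^ tab[(crc ^ data[k]) & 0xFF]
--         if found:
--             count += 1
--             i = found
--         else:
--             i += 1
--     return count
-- ===== Notes on version B (the rewrite author's own statement) =====
-- stated objective: alternative
-- what changed: Instead of recomputing the Modbus CRC of data[i:j-2] from scratch for every candidate frame end j, B keeps one running CRC per start index i, extending it by one precomputed-table lookup per candidate and comparing it against the next two bytes directly.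
import Mathlib
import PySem

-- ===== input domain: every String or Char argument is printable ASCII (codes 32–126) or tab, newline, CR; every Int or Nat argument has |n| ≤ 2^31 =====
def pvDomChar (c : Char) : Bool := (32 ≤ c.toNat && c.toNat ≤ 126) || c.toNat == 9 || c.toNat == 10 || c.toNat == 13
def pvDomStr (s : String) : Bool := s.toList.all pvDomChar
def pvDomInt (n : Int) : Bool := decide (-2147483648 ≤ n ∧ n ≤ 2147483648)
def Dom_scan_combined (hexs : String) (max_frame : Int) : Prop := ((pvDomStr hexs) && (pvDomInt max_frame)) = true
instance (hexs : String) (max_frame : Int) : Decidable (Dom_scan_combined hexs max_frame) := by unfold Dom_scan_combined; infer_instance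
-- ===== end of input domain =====

-- B replaces A's per-candidate CRC recomputation by one running CRC per start index,
-- extended by one table lookup per candidate frame end (objective: alternative algorithm).

-- ===== shared helpers (both Pythons call bytes.fromhex and the same CRC byte step) =====

-- one hex digit value; none = not a hex digit (bytes.fromhex raises ValueError)
def hexVal? (c : Char) : Option Nat :=
  if 48 ≤ c.toNat ∧ c.toNat ≤ 57 then some (c.toNat - 48)
  else if 97 ≤ c.toNat ∧ c.toNat ≤ 102 then some (c.toNat - 87)
  else if 65 ≤ c.toNat ∧ c.toNat ≤ 70 then some (c.toNat - 55)
  else none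

-- ASCII whitespace, which bytes.fromhex (Python ≥3.11) skips between byte pairs
def isHexWs (c : Char) : Bool :=
  c.toNat == 32 || c.toNat == 9 || c.toNat == 10 || c.toNat == 13 || c.toNat == 11 || c.toNat == 12

-- bytes.fromhex: whitespace allowed between two-digit pairs, never inside a pair; none = ValueError
def fromhex? : List Char → Option (List Nat)
  | [] => some []
  | c :: rest =>
    if isHexWs c then fromhex? rest
    else
      match hexVal? c with
      | none => none
      | some h =>
        match rest with
        | [] => none
        | c2 :: rest2 =>
          match hexVal? c2 with
          | none => none
          | some h2 => (fromhex? rest2).map (fun bs => (16 * h + h2) :: bs)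

-- one bit round of modbus_crc's inner 'for _ in range(8)'
def crcRound (crc : Nat) : Nat :=
  if crc &&& 1 == 1 then (crc >>> 1) ^^^ 0xA001 else crc >>> 1

-- one iteration of modbus_crc's outer loop: xor the byte in, then 8 bit rounds
def crcByte (crc b : Nat) : Nat :=
  (List.range 8).foldl (fun c _ => crcRound c) (crc ^^^ b)

-- ===== PORT A =====

def modbusCrc (bs : List Nat) : Nat := (bs.foldl crcByte 0xFFFF) &&& 0xFFFF

-- crc_ok(frame); frame[-2:] little-endian = b0 + 256*b1; indices are in range whenever used
def crcOk (frame : List Nat) : Bool :=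
  if frame.length < 4 then false
  else
    modbusCrc (frame.take (frame.length - 2)) ==
      (frame.drop (frame.length - 2)).getD 0 0 + 256 * (frame.drop (frame.length - 2)).getD 1 0

-- A's inner 'for j in range(i+4, max_j+1)', as a countdown over the range's length
def innerA (data : List Nat) (i : Nat) : Nat → Nat → Option Nat
  | _, 0 => none
  | j, n+1 =>
    if crcOk ((data.drop i).take (j - i)) then some j
    else innerA data i (j+1) n

-- A's outer while loop; i strictly increases each iteration, so fuel = L+1 never runs out
def loopA (data : List Nat) (max_frame : Int) : Nat → Nat → Nat → Nat
  | 0, _, count => count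
  | fuel+1, i, count =>
    if i + 4 ≤ data.length then
      -- max_j = min(L, i + max_frame); the for-loop runs (max_j + 1) - (i + 4) times
      match innerA data i (i+4)
          (min (data.length : Int) ((i : Int) + max_frame) + 1 - ((i : Int) + 4)).toNat with
      | some j => loopA data max_frame fuel j (count+1)
      | none => loopA data max_frame fuel (i+1) count
    else count

def scan_combined (hexs : String) (max_frame : Int) : Int :=
  match fromhex? hexs.toList with
  | none => 0
  | some data => (loopA data max_frame (data.length + 1) 0 0 : Nat)

-- ===== PORT B =====

-- B's _CRC_TABLE (built once, cached): entry t = 8 bit rounds applied to t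
def crcTable : List Nat :=
  (List.range 256).map (fun t => (List.range 8).foldl (fun c _ => crcRound c) t)

-- B's inlined table step: crc = (crc >> 8) ^ tab[(crc ^ b) & 0xFF]
def tableStep (crc b : Nat) : Nat :=
  (crc >>> 8) ^^^ crcTable.getD ((crc ^^^ b) &&& 255) 0

-- B's inner 'for k in range(i+2, max_j-1)': running crc of data[i:k], checked against data[k:k+2]
def innerB (data : List Nat) : Nat → Nat → Nat → Option Nat
  | _, _, 0 => none
  | k, crc, n+1 =>
    if crc == data.getD k 0 + 256 * data.getD (k+1) 0 then some (k+2)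
    else innerB data (k+1) (tableStep crc (data.getD k 0)) n

def loopB (data : List Nat) (max_frame : Int) : Nat → Nat → Nat → Nat
  | 0, _, count => count
  | fuel+1, i, count =>
    if i + 4 ≤ data.length then
      -- max_j = min(L, i + max_frame); the for-loop runs (max_j - 1) - (i + 2) times
      match innerB data (i+2) (tableStep (tableStep 0xFFFF (data.getD i 0)) (data.getD (i+1) 0))
          (min (data.length : Int) ((i : Int) + max_frame) - 1 - ((i : Int) + 2)).toNat with
      | some j => loopB data max_frame fuel j (count+1)
      | none => loopB data max_frame fuel (i+1) count
    else count

def scan_combined_alt (hexs : String) (max_frame : Int) : Int :=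
  match fromhex? hexs.toList with
  | none => 0
  | some data =>
    -- if L < 4: return 0 (the scan cannot start); else run the scan loop
    if data.length < 4 then 0
    else (loopB data max_frame (data.length + 1) 0 0 : Nat)

-- ===== PRECONDITION & SPEC =====
def Spec_scan_combined (hexs : String) (max_frame : Int) (out : Int) : Prop := out = scan_combined_alt hexs max_frame
instance (hexs : String) (max_frame : Int) (out : Int) : Decidable (Spec_scan_combined hexs max_frame out) := by unfold Spec_scan_combined; infer_instance

-- ===== CLAIM (what is proved, stated in full; the proofs are below) =====
def Claim_equal_scan_combined : Prop := ∀ (hexs : String) (max_frame : Int), Dom_scan_combined hexs max_frame → Spec_scan_combined hexs max_frame (scan_combined hexs max_frame)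

-- ===== LEMMAS AND PROOFS =====

theorem hexVal_lt {c : Char} {h : Nat} (hh : hexVal? c = some h) : h < 16 := by
  unfold hexVal? at hh
  split_ifs at hh <;> (injection hh with e; omega)

theorem fromhex_bytes_lt : ∀ cs bs, fromhex? cs = some bs → ∀ b ∈ bs, b < 256 := by
  intro cs
  fun_induction fromhex? cs with
  | case1 => intro bs h b hb; injection h with e; subst e; simp at hb
  | case2 c rest _ ih => exact ih
  | case3 => intro bs h; exact absurd h (by simp)
  | case4 => intro bs h; exact absurd h (by simp)
  | case5 => intro bs h; exact absurd h (by simp)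
  | case6 c rest h hv c2 rest2 h2 hv2 ih =>
    intro bs hbs b hb
    rw [Option.map_eq_some_iff] at hbs
    obtain ⟨bs', hbs', rfl⟩ := hbs
    rcases List.mem_cons.mp hb with rfl | hmem
    · have := hexVal_lt hv; have := hexVal_lt hv2; omega
    · exact ih bs' hbs' b hmem

theorem xor_lt_65536 {a b : Nat} (ha : a < 65536) (hb : b < 65536) : a ^^^ b < 65536 := by
  have := Nat.xor_lt_two_pow (x := a) (y := b) (n := 16) (by omega) (by omega)
  omega

theorem crcRound_lt {c : Nat} (hc : c < 65536) : crcRound c < 65536 := by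
  unfold crcRound
  have h2 : c >>> 1 < 65536 := by simp [Nat.shiftRight_one]; omega
  split
  · exact xor_lt_65536 h2 (by norm_num)
  · exact h2

theorem crcByte_eq (c b : Nat) : crcByte c b =
    crcRound (crcRound (crcRound (crcRound (crcRound (crcRound (crcRound (crcRound (c ^^^ b)))))))) := rfl

theorem crcByte_lt {c b : Nat} (hc : c < 65536) (hb : b < 65536) : crcByte c b < 65536 := by
  rw [crcByte_eq]
  exact crcRound_lt (crcRound_lt (crcRound_lt (crcRound_lt (crcRound_lt (crcRound_lt
    (crcRound_lt (crcRound_lt (xor_lt_65536 hc hb))))))))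

theorem rawCrc_lt_aux : ∀ (l : List Nat) (acc : Nat), acc < 65536 → (∀ b ∈ l, b < 256) →
    l.foldl crcByte acc < 65536 := by
  intro l
  induction l with
  | nil => intro acc h _; simpa using h
  | cons x xs ih =>
    intro acc h hl
    simp only [List.foldl_cons]
    exact ih _ (crcByte_lt h (by have := hl x (by simp); omega)) (fun b hb => hl b (by simp [hb]))

theorem rawCrc_lt {l : List Nat} (hl : ∀ b ∈ l, b < 256) : l.foldl crcByte 0xFFFF < 65536 :=
  rawCrc_lt_aux l 0xFFFF (by norm_num) hl

theorem mask_eq {x : Nat} (h : x < 65536) : x &&& 65535 = x := by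
  have h2 : (65535 : Nat) = 2 ^ 16 - 1 := by norm_num
  rw [h2, Nat.and_two_pow_sub_one_eq_mod, Nat.mod_eq_of_lt (by omega)]

theorem roundR (a b : Nat) : crcRound (a ^^^ b <<< 1) = crcRound a ^^^ b := by
  have h1 : (a ^^^ b <<< 1) >>> 1 = a >>> 1 ^^^ b := by
    apply Nat.eq_of_testBit_eq
    intro n
    simp [Nat.testBit_shiftRight, Nat.testBit_shiftLeft, Nat.add_comm 1 n]
  have hb0 : (b <<< 1).testBit 0 = false := by
    rw [Nat.testBit_shiftLeft]; simp
  have ht : (a ^^^ b <<< 1).testBit 0 = a.testBit 0 := by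
    rw [Nat.testBit_xor, hb0]; simp
  have h0 : (a ^^^ b <<< 1) &&& 1 = a &&& 1 := by
    rw [Nat.and_one_is_mod, Nat.and_one_is_mod]
    simp only [Nat.testBit_zero] at ht
    rcases Nat.mod_two_eq_zero_or_one (a ^^^ b <<< 1) with h | h <;>
      rcases Nat.mod_two_eq_zero_or_one a with h' | h' <;> simp [h, h'] at ht ⊢
  unfold crcRound
  rw [h0, h1]
  split
  · rw [Nat.xor_assoc, Nat.xor_comm b, ← Nat.xor_assoc]
  · rfl

theorem iterR : ∀ (k x hi : Nat), crcRound^[k] (x ^^^ hi <<< k) = crcRound^[k] x ^^^ hi := by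
  intro k
  induction k with
  | zero => intro x hi; simp
  | succ k ih =>
    intro x hi
    rw [Function.iterate_succ_apply, Function.iterate_succ_apply]
    have hsl : hi <<< (k + 1) = (hi <<< k) <<< 1 := by
      simp [Nat.shiftLeft_eq, pow_succ]; ring
    rw [hsl, roundR, ih]

theorem decomp (y : Nat) : y = (y &&& 255) ^^^ (y >>> 8) <<< 8 := by
  apply Nat.eq_of_testBit_eq
  intro n
  rw [Nat.testBit_xor, Nat.testBit_and, Nat.testBit_shiftLeft, Nat.testBit_shiftRight]
  by_cases h : n < 8
  · rw [show (255 : Nat) = 2 ^ 8 - 1 by norm_num, Nat.testBit_two_pow_sub_one]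
    simp [h, Nat.not_le.mpr h]
  · rw [Nat.testBit_eq_false_of_lt (show (255 : Nat) < 2 ^ n from
      lt_of_lt_of_le (show (255 : Nat) < 2 ^ 8 by norm_num)
        (Nat.pow_le_pow_right (by norm_num) (by omega))),
      show 8 + (n - 8) = n by omega]
    simp [Nat.le_of_not_lt h]

theorem shift8 {c b : Nat} (hb : b < 256) : (c ^^^ b) >>> 8 = c >>> 8 := by
  apply Nat.eq_of_testBit_eq
  intro n
  rw [Nat.testBit_shiftRight, Nat.testBit_shiftRight, Nat.testBit_xor,
    Nat.testBit_eq_false_of_lt (show b < 2 ^ (8 + n) from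
      lt_of_lt_of_le (show b < 2 ^ 8 by omega)
        (Nat.pow_le_pow_right (by norm_num) (by omega)))]
  simp

theorem tableStep_eq {crc b : Nat} (hb : b < 256) : tableStep crc b = crcByte crc b := by
  have ht : (crc ^^^ b) &&& 255 < 256 := by
    have := Nat.and_le_right (n := crc ^^^ b) (m := 255); omega
  have hget : crcTable.getD ((crc ^^^ b) &&& 255) 0 = crcRound^[8] ((crc ^^^ b) &&& 255) := by
    unfold crcTable
    rw [List.getD_eq_getElem?_getD, List.getElem?_map, List.getElem?_range ht]
    rfl
  unfold tableStep
  rw [hget]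
  have hcb : crcByte crc b = crcRound^[8] (crc ^^^ b) := rfl
  rw [hcb]
  conv_rhs => rw [decomp (crc ^^^ b)]
  rw [iterR, shift8 hb, Nat.xor_comm]

theorem getD_lt_256 {data : List Nat} (hb : ∀ b ∈ data, b < 256) (k : Nat) :
    data.getD k 0 < 256 := by
  by_cases h : k < data.length
  · rw [List.getD_eq_getElem _ _ h]
    exact hb _ (List.getElem_mem h)
  · rw [List.getD_eq_default _ _ (by omega)]
    norm_num

theorem slice_mem_lt {data : List Nat} (hb : ∀ b ∈ data, b < 256) {i m : Nat} :
    ∀ b ∈ (data.drop i).take m, b < 256 :=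
  fun b h => hb b (List.mem_of_mem_drop (List.mem_of_mem_take h))

theorem slice_snoc {data : List Nat} {i k : Nat} (hik : i ≤ k) (hk : k < data.length) :
    (data.drop i).take (k + 1 - i) = (data.drop i).take (k - i) ++ [data.getD k 0] := by
  have h1 : k + 1 - i = (k - i) + 1 := by omega
  rw [h1, List.take_add_one]
  have h2 : (data.drop i)[k - i]? = some (data.getD k 0) := by
    rw [List.getElem?_drop]
    have h3 : i + (k - i) = k := by omega
    rw [h3, List.getElem?_eq_getElem hk, List.getD_eq_getElem _ _ hk]
  rw [h2]; rfl

theorem inner_eq (data : List Nat) (hb : ∀ b ∈ data, b < 256) :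
    ∀ n k i, i + 2 ≤ k → k + 1 + n ≤ data.length →
    innerA data i (k+2) n = innerB data k (((data.drop i).take (k - i)).foldl crcByte 0xFFFF) n := by
  intro n
  induction n with
  | zero => intro k i _ _; rfl
  | succ n ih =>
    intro k i hik hkL
    have hk2 : k + 2 ≤ data.length := by omega
    have hcond : crcOk ((data.drop i).take (k + 2 - i)) =
        ((((data.drop i).take (k - i)).foldl crcByte 0xFFFF) ==
          data.getD k 0 + 256 * data.getD (k+1) 0) := by
      unfold crcOk
      have hflen : ((data.drop i).take (k + 2 - i)).length = k + 2 - i := by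
        rw [List.length_take, List.length_drop]; omega
      rw [hflen]
      have h4 : ¬ (k + 2 - i < 4) := by omega
      rw [if_neg h4]
      have hpay : ((data.drop i).take (k + 2 - i)).take (k + 2 - i - 2)
          = (data.drop i).take (k - i) := by
        rw [List.take_take]
        congr 1
        omega
      have htail : ((data.drop i).take (k + 2 - i)).drop (k + 2 - i - 2)
          = (data.drop k).take 2 := by
        rw [List.drop_take, List.drop_drop]
        have h1 : k + 2 - i - (k + 2 - i - 2) = 2 := by omega
        have h2 : i + (k + 2 - i - 2) = k := by omega
        rw [h1, h2]
      have hmask : modbusCrc ((data.drop i).take (k - i))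
          = ((data.drop i).take (k - i)).foldl crcByte 0xFFFF := by
        unfold modbusCrc
        exact mask_eq (rawCrc_lt (slice_mem_lt hb))
      have hg0 : ((data.drop k).take 2).getD 0 0 = data.getD k 0 := by
        simp [List.getD_eq_getElem?_getD, List.getElem?_drop]
      have hg1 : ((data.drop k).take 2).getD 1 0 = data.getD (k+1) 0 := by
        simp [List.getD_eq_getElem?_getD, List.getElem?_drop]
      rw [hpay, htail, hmask, hg0, hg1]
    have hstep : (data.drop i).take (k + 1 - i)
        = (data.drop i).take (k - i) ++ [data.getD k 0] :=
      slice_snoc (by omega) (by omega)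
    have hih := ih (k+1) i (by omega) (by omega)
    rw [hstep, List.foldl_append, List.foldl_cons, List.foldl_nil] at hih
    show (if crcOk ((data.drop i).take (k + 2 - i)) then some (k+2)
          else innerA data i (k+2+1) n) = _
    rw [hcond]
    unfold innerB
    by_cases h : (((data.drop i).take (k - i)).foldl crcByte 0xFFFF)
        = data.getD k 0 + 256 * data.getD (k+1) 0
    · simp [h]
    · have hbf : ((((data.drop i).take (k - i)).foldl crcByte 0xFFFF) ==
          data.getD k 0 + 256 * data.getD (k+1) 0) = false := beq_eq_false_iff_ne.mpr h
      rw [hbf]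
      simp only [Bool.false_eq_true, if_false]
      rw [tableStep_eq (getD_lt_256 hb k)]
      exact hih

theorem take_two {data : List Nat} {i : Nat} (h : i + 2 ≤ data.length) :
    (data.drop i).take 2 = [data.getD i 0, data.getD (i+1) 0] := by
  have e1 := slice_snoc (data := data) (i := i) (k := i) (le_refl i) (by omega)
  have e2 := slice_snoc (data := data) (i := i) (k := i + 1) (by omega) (by omega)
  have n0 : i - i = 0 := by omega
  have n1 : i + 1 - i = 1 := by omega
  have n2 : i + 1 + 1 - i = 2 := by omega
  rw [n0, n1] at e1
  rw [n2, n1] at e2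
  rw [e2, e1]
  rfl

theorem loop_eq (data : List Nat) (mf : Int) (hb : ∀ b ∈ data, b < 256) :
    ∀ fuel i count, loopA data mf fuel i count = loopB data mf fuel i count := by
  intro fuel
  induction fuel with
  | zero => intro i count; rfl
  | succ fuel ih =>
    intro i count
    by_cases hg : i + 4 ≤ data.length
    · have hn : (min (data.length : Int) ((i : Int) + mf) + 1 - ((i : Int) + 4)).toNat
              = (min (data.length : Int) ((i : Int) + mf) - 1 - ((i : Int) + 2)).toNat := by
        omega
      have hnL : (i + 2) + 1 + (min (data.length : Int) ((i : Int) + mf) - 1 - ((i : Int) + 2)).toNat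
              ≤ data.length := by
        omega
      have hinner := inner_eq data hb
        ((min (data.length : Int) ((i : Int) + mf) - 1 - ((i : Int) + 2)).toNat)
        (i + 2) i (by omega) hnL
      have hk2 : i + 2 - i = 2 := by omega
      rw [hk2, take_two (by omega)] at hinner
      have hcrc : ([data.getD i 0, data.getD (i+1) 0]).foldl crcByte 0xFFFF
          = crcByte (crcByte 0xFFFF (data.getD i 0)) (data.getD (i+1) 0) := rfl
      rw [hcrc, ← tableStep_eq (getD_lt_256 hb (i+1)), ← tableStep_eq (getD_lt_256 hb i)]
        at hinner
      show (if i + 4 ≤ data.length then _ else count) = (if i + 4 ≤ data.length then _ else count)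
      rw [if_pos hg, if_pos hg]
      rw [← hn] at hinner
      rw [hinner, hn]
      cases innerB data (i + 2)
          (tableStep (tableStep 0xFFFF (data.getD i 0)) (data.getD (i+1) 0))
          ((min (data.length : Int) ((i : Int) + mf) - 1 - ((i : Int) + 2)).toNat) with
      | none => exact ih (i+1) count
      | some j => exact ih j (count+1)
    · show (if i + 4 ≤ data.length then _ else count) = (if i + 4 ≤ data.length then _ else count)
      rw [if_neg hg, if_neg hg]

-- ===== VERDICT (by name: the statement is the Claim_ definition above) =====
theorem scan_combined_spec : Claim_equal_scan_combined := by
  intro hexs max_frame _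
  unfold Spec_scan_combined scan_combined scan_combined_alt
  cases h : fromhex? hexs.toList with
  | none => rfl
  | some data =>
    simp only []
    rw [loop_eq data max_frame (fromhex_bytes_lt _ _ h)]
    by_cases h4 : data.length < 4
    · rw [if_pos h4]
      have h0 : loopB data max_frame (data.length + 1) 0 0 = 0 := by
        simp only [loopB]
        rw [if_neg (by omega)]
      rw [h0]
      norm_num
    · rw [if_neg h4]
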